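-- pv_equiv track=rewrite | github.com/devDabbler/Sentient-Trader | src/integrations/discord_channels.py | is_crypto_symbol
-- ===== SOURCE A (Python) =====
-- KNOWN_CRYPTO_SYMBOLS = {
--     "BTC", "ETH", "SOL", "XRP", "ADA", "DOGE", "SHIB", "AVAX", "DOT", "LINK",
--     "MATIC", "UNI", "ATOM", "LTC", "BCH", "XLM", "ALGO", "VET", "FIL", "THETA",
--     "XMR", "ETC", "AAVE", "MKR", "COMP", "SNX", "CRV", "YFI", "SUSHI", "INCH",
--     "APE", "SAND", "MANA", "AXS", "ENJ", "CHZ", "GALA", "IMX", "LRC", "ENS",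
--     "OP", "ARB", "PEPE", "FLOKI", "BONK", "WIF", "BOME", "MEME", "SLERF",
--     "BTCUSD", "ETHUSD", "SOLUSD", "XRPUSD",  # Kraken-style pairs
-- }
--
-- def is_crypto_symbol(symbol: str) -> bool:
--     """Check if a symbol is a cryptocurrency"""
--     if not symbol:
--         return False
--
--     # Clean the symbol
--     clean_symbol = symbol.upper().replace("/", "").replace("-", "")
--
--     # Check direct match
--     if clean_symbol in KNOWN_CRYPTO_SYMBOLS:
--         return True
--
--     # Check if it ends with USD (Kraken-style)
--     if clean_symbol.endswith("USD") and clean_symbol[:-3] in KNOWN_CRYPTO_SYMBOLS: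
--         return True
--
--     # Check if it contains known crypto symbols (e.g., "BTC/USD", "ETH-USD")
--     for crypto in KNOWN_CRYPTO_SYMBOLS:
--         if clean_symbol.startswith(crypto):
--             return True
--
--     return False
-- ===== SOURCE B (Python) =====
-- KNOWN_CRYPTO_SYMBOLS = {
--     "BTC", "ETH", "SOL", "XRP", "ADA", "DOGE", "SHIB", "AVAX", "DOT", "LINK",
--     "MATIC", "UNI", "ATOM", "LTC", "BCH", "XLM", "ALGO", "VET", "FIL", "THETA",
--     "XMR", "ETC", "AAVE", "MKR", "COMP", "SNX", "CRV", "YFI", "SUSHI", "INCH",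
--     "APE", "SAND", "MANA", "AXS", "ENJ", "CHZ", "GALA", "IMX", "LRC", "ENS",
--     "OP", "ARB", "PEPE", "FLOKI", "BONK", "WIF", "BOME", "MEME", "SLERF",
--     "BTCUSD", "ETHUSD", "SOLUSD", "XRPUSD",
-- }
--
-- _MAX_LEN = max(len(s) for s in KNOWN_CRYPTO_SYMBOLS)
--
-- def is_crypto_symbol(symbol: str) -> bool:
--     """Check if a symbol is a cryptocurrency"""
--     clean = symbol.upper().replace("/", "").replace("-", "")
--     # All of A's checks amount to: some known symbol is a prefix of the cleaned string.
--     # No known symbol is longer than _MAX_LEN, so only that many prefixes need probing.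
--     return any(clean[:i] in KNOWN_CRYPTO_SYMBOLS
--                for i in range(1, min(len(clean), _MAX_LEN) + 1))
-- ===== Notes on version B (the rewrite author's own statement) =====
-- stated objective: idiomatic
-- what changed: All three of A's checks (direct match, endswith-USD, startswith scan) amount to: some known symbol is a prefix of the cleaned input; B therefore iterates over the prefixes of the cleaned input (only up to the longest known symbol's length) and probes the set once per prefix, instead of scanning the whole known-symbol set with startswith.
import Mathlib
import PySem

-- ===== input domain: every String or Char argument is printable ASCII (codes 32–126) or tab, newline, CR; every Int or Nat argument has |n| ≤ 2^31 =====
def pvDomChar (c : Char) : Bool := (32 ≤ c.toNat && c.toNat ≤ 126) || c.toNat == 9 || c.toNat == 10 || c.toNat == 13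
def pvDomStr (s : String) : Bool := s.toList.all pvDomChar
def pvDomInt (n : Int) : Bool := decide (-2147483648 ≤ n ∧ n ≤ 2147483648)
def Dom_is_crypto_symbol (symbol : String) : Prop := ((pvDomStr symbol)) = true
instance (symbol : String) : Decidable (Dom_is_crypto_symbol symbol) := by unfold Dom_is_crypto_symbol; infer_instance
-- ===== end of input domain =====

-- B replaces A's scan over all known symbols (plus two redundant membership checks) by a single
-- pass over the cleaned input's prefixes, probing the symbol set once per prefix (alternative decomposition).


-- ===== PORT A =====
-- KNOWN_CRYPTO_SYMBOLS (a Python set literal; all elements distinct)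
def pvKnown : PySem.Set String := PySem.Set.ofList
  ["BTC", "ETH", "SOL", "XRP", "ADA", "DOGE", "SHIB", "AVAX", "DOT", "LINK",
   "MATIC", "UNI", "ATOM", "LTC", "BCH", "XLM", "ALGO", "VET", "FIL", "THETA",
   "XMR", "ETC", "AAVE", "MKR", "COMP", "SNX", "CRV", "YFI", "SUSHI", "INCH",
   "APE", "SAND", "MANA", "AXS", "ENJ", "CHZ", "GALA", "IMX", "LRC", "ENS",
   "OP", "ARB", "PEPE", "FLOKI", "BONK", "WIF", "BOME", "MEME", "SLERF",
   "BTCUSD", "ETHUSD", "SOLUSD", "XRPUSD"]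

def is_crypto_symbol (symbol : String) : Bool :=
  if PySem.Str.len symbol == 0 then false
  else
    let clean := PySem.Str.replace (PySem.Str.replace (PySem.Str.upper symbol) "/" "") "-" ""
    if PySem.Set.contains pvKnown clean then true
    else if PySem.Str.endswith clean "USD"
            && PySem.Set.contains pvKnown (PySem.Str.slice clean none (some (-3))) then true
    else pvKnown.any (fun crypto => PySem.Str.startswith clean crypto)

-- ===== PORT B =====
def pvMaxLen : Int := pvKnown.foldl (fun m s => max m (PySem.Str.len s)) 0

def is_crypto_symbol_alt (symbol : String) : Bool :=
  let clean := PySem.Str.replace (PySem.Str.replace (PySem.Str.upper symbol) "/" "") "-" ""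
  (PySem.List.pyRange 1 (min (PySem.Str.len clean) pvMaxLen + 1) 1).any
    (fun i => PySem.Set.contains pvKnown (PySem.Str.slice clean none (some i)))

-- ===== PRECONDITION & SPEC =====
def Spec_is_crypto_symbol (symbol : String) (out : Bool) : Prop := out = is_crypto_symbol_alt symbol
instance (symbol : String) (out : Bool) : Decidable (Spec_is_crypto_symbol symbol out) := by unfold Spec_is_crypto_symbol; infer_instance

-- ===== CLAIM (what is proved, stated in full; the proofs are below) =====
def Claim_equal_is_crypto_symbol : Prop := ∀ (symbol : String), Dom_is_crypto_symbol symbol → Spec_is_crypto_symbol symbol (is_crypto_symbol symbol)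

-- ===== LEMMAS AND PROOFS =====

-- every known symbol is a nonempty string
set_option maxRecDepth 8192 in
theorem pvKnown_nonempty : ∀ k ∈ pvKnown, 0 < k.toList.length := by decide

-- B's loop says: some prefix of c (of positive length) is a known symbol
-- every known symbol has length at most pvMaxLen
set_option maxRecDepth 8192 in
theorem pvKnown_le_max : ∀ k ∈ pvKnown, (k.toList.length : Int) ≤ pvMaxLen := by decide

theorem alt_loop_iff (c : String) :
    ((PySem.List.pyRange 1 (min (PySem.Str.len c) pvMaxLen + 1) 1).any
      (fun i => PySem.Set.contains pvKnown (PySem.Str.slice c none (some i))) = true)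
    ↔ ∃ k ∈ pvKnown, k.toList <+: c.toList := by
  rw [List.any_eq_true]
  constructor
  · rintro ⟨i, hi, hc⟩
    rw [PySem.List.mem_pyRange_one] at hi
    refine ⟨PySem.Str.slice c none (some i), (PySem.Set.contains_iff _ _).mp hc, ?_⟩
    have h0 : (0:Int) ≤ i := by omega
    rw [PySem.Str.toList_slice, PySem.Chars.slice, PySem.List.slice_to c.toList h0]
    exact List.take_prefix _ _
  · rintro ⟨k, hk, hpre⟩
    refine ⟨(k.toList.length : Int), ?_, ?_⟩
    · rw [PySem.List.mem_pyRange_one]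
      have h1 := pvKnown_nonempty k hk
      have h2 := hpre.length_le
      have h3 := pvKnown_le_max k hk
      rw [PySem.Str.len_eq]
      omega
    · rw [PySem.Set.contains_iff]
      have heq : PySem.Str.slice c none (some (k.toList.length : Int)) = k := by
        apply String.toList_inj.mp
        rw [PySem.Str.toList_slice, PySem.Chars.slice, PySem.List.slice_to_natCast]
        exact (List.prefix_iff_eq_take.mp hpre).symm
      rw [heq]; exact hk

-- A's three checks say the same thing
theorem a_branches_iff (c : String) :
    ((if PySem.Set.contains pvKnown c then true
      else if PySem.Str.endswith c "USD"
              && PySem.Set.contains pvKnown (PySem.Str.slice c none (some (-3))) then true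
      else pvKnown.any (fun crypto => PySem.Str.startswith c crypto)) = true)
    ↔ ∃ k ∈ pvKnown, k.toList <+: c.toList := by
  split_ifs with h1 h2
  · simp only [true_iff]
    exact ⟨c, (PySem.Set.contains_iff _ _).mp h1, List.prefix_refl _⟩
  · simp only [true_iff]
    rw [Bool.and_eq_true] at h2
    refine ⟨PySem.Str.slice c none (some (-3)), (PySem.Set.contains_iff _ _).mp h2.2, ?_⟩
    rw [PySem.Str.toList_slice, PySem.Chars.slice, PySem.List.slice_to_neg_ofNat c.toList 3 (by omega)]
    exact List.take_prefix _ _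
  · rw [List.any_eq_true]
    constructor
    · rintro ⟨k, hk, hs⟩
      refine ⟨k, hk, ?_⟩
      simpa [PySem.Chars.startswith_iff] using hs
    · rintro ⟨k, hk, hpre⟩
      refine ⟨k, hk, ?_⟩
      simpa [PySem.Chars.startswith_iff] using hpre

-- ===== VERDICT (by name: the statement is the Claim_ definition above) =====
set_option maxRecDepth 8192 in
theorem is_crypto_symbol_spec : Claim_equal_is_crypto_symbol := by
  intro symbol _
  unfold Spec_is_crypto_symbol
  by_cases hs : symbol = ""
  · subst hs; decide
  · have hg : (PySem.Str.len symbol == 0) = false := by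
      simp [PySem.Str.len_eq, hs]
    unfold is_crypto_symbol is_crypto_symbol_alt
    rw [hg]
    simp only [Bool.false_eq_true, if_false]
    rw [Bool.eq_iff_iff, a_branches_iff, alt_loop_iff]
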